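-- pv_equiv track=rewrite | github.com/mapachekurt/mapachev1 | src/evaluation/validator.py | validate_sentiment
-- ===== SOURCE A (Python) =====
-- def validate_sentiment(actual: str, expected: str) -> bool:
--     """
--     Validate sentiment classification.
--
--     Args:
--         actual: Actual sentiment
--         expected: Expected sentiment
--
--     Returns:
--         bool: True if sentiments match
--     """
--     sentiment_map = {
--         "positive": ["positive", "good", "happy", "excellent"],
--         "negative": ["negative", "bad", "sad", "poor"],
--         "neutral": ["neutral", "okay", "moderate"],
--     }
--
--     actual_lower = actual.lower()
--     expected_lower = expected.lower()
--
--     for sentiment, keywords in sentiment_map.items():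
--         if expected_lower in keywords and actual_lower in keywords:
--             return True
--
--     return actual_lower == expected_lower
-- ===== SOURCE B (Python) =====
-- def validate_sentiment(actual: str, expected: str) -> bool:
--     """
--     Validate sentiment classification.
--
--     Returns:
--         bool: True if sentiments match
--     """
--     sentiment_map = {
--         "positive": ["positive", "good", "happy", "excellent"],
--         "negative": ["negative", "bad", "sad", "poor"],
--         "neutral": ["neutral", "okay", "moderate"],
--     }
--     # reverse index: keyword -> category (keywords are pairwise disjoint)
--     index = {kw: cat for cat, kws in sentiment_map.items() for kw in kws}
--
--     actual_lower = actual.lower()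
--     expected_lower = expected.lower()
--
--     cat_a = index.get(actual_lower)
--     if cat_a is not None and index.get(expected_lower) == cat_a:
--         return True
--     return actual_lower == expected_lower
-- ===== Notes on version B (the rewrite author's own statement) =====
-- stated objective: idiomatic
-- what changed: Replaces the category-scanning loop (for each category, test both strings against its keyword list) with a reverse index dict keyword->category built once, so matching is two direct lookups plus the same raw-equality fallback.
import Mathlib
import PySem

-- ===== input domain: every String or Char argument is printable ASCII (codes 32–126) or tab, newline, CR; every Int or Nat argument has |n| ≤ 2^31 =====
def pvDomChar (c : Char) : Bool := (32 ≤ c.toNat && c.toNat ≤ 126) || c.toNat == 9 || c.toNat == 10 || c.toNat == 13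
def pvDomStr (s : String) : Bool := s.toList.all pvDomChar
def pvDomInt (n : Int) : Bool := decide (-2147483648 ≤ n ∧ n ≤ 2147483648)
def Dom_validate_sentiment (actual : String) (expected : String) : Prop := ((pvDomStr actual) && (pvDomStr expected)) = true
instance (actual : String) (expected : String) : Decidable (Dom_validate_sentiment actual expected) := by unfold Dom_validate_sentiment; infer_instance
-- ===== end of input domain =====

-- B replaces A's category-scanning loop with a reverse keyword->category index dict built once; two lookups + the same raw-equality fallback (idiomatic, same behaviour).


-- ===== PORT A =====
-- the literal sentiment_map dict shared by A's source and B's source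
def pvSentimentMap : PySem.Dict String (List String) :=
  PySem.Dict.ofList
    [ ("positive", ["positive", "good", "happy", "excellent"])
    , ("negative", ["negative", "bad", "sad", "poor"])
    , ("neutral",  ["neutral", "okay", "moderate"]) ]

-- A's for-loop with early return over sentiment_map.items()
def pvLoopA (items : List (String × List String)) (al el : String) : Bool :=
  match items with
  | [] => al == el
  | (_, kws) :: rest =>
      if kws.contains el && kws.contains al then true
      else pvLoopA rest al el

def validate_sentiment (actual : String) (expected : String) : Bool :=
  let al := PySem.Str.lower actual
  let el := PySem.Str.lower expected
  pvLoopA pvSentimentMap.items al el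

-- ===== PORT B =====
-- B's reverse index: {kw: cat for cat, kws in sentiment_map.items() for kw in kws}
def pvIndexB : PySem.Dict String String :=
  pvSentimentMap.items.foldl
    (fun d p => p.2.foldl (fun d' kw => d'.insert kw p.1) d)
    PySem.Dict.empty

def validate_sentiment_alt (actual : String) (expected : String) : Bool :=
  let al := PySem.Str.lower actual
  let el := PySem.Str.lower expected
  match pvIndexB.get? al with
  | some ca => if pvIndexB.get? el == some ca then true else al == el
  | none => al == el

-- ===== PRECONDITION & SPEC =====
def Spec_validate_sentiment (actual : String) (expected : String) (out : Bool) : Prop := out = validate_sentiment_alt actual expected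
instance (actual : String) (expected : String) (out : Bool) : Decidable (Spec_validate_sentiment actual expected out) := by unfold Spec_validate_sentiment; infer_instance

-- ===== CLAIM (what is proved, stated in full; the proofs are below) =====
def Claim_equal_validate_sentiment : Prop := ∀ (actual : String) (expected : String), Dom_validate_sentiment actual expected → Spec_validate_sentiment actual expected (validate_sentiment actual expected)

-- ===== LEMMAS AND PROOFS =====

-- the reverse index, evaluated to its literal association list
theorem pv_index_eq : pvIndexB = PySem.Dict.mk [("positive","positive"),("good","positive"),("happy","positive"),("excellent","positive"),("negative","negative"),("bad","negative"),("sad","negative"),("poor","negative"),("neutral","neutral"),("okay","neutral"),("moderate","neutral")] := by decide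

theorem pv_get?_nil (y : String) : (PySem.Dict.mk ([] : List (String × String))).get? y = none := rfl

theorem pv_pos (x : String) :
    (["positive","good","happy","excellent"].contains x) = (pvIndexB.get? x == some "positive") := by
  rw [pv_index_eq]
  simp only [PySem.Dict.get?_mk_cons, List.contains_cons, List.contains_nil, pv_get?_nil]
  by_cases h0 : x = "positive"
  · subst h0; decide
  by_cases h1 : x = "good"
  · subst h1; decide
  by_cases h2 : x = "happy"
  · subst h2; decide
  by_cases h3 : x = "excellent"
  · subst h3; decide
  by_cases h4 : x = "negative"
  · subst h4; decide
  by_cases h5 : x = "bad"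
  · subst h5; decide
  by_cases h6 : x = "sad"
  · subst h6; decide
  by_cases h7 : x = "poor"
  · subst h7; decide
  by_cases h8 : x = "neutral"
  · subst h8; decide
  by_cases h9 : x = "okay"
  · subst h9; decide
  by_cases h10 : x = "moderate"
  · subst h10; decide
  simp only [beq_eq_false_iff_ne.mpr h0, beq_eq_false_iff_ne.mpr (Ne.symm h0), beq_eq_false_iff_ne.mpr h1, beq_eq_false_iff_ne.mpr (Ne.symm h1), beq_eq_false_iff_ne.mpr h2, beq_eq_false_iff_ne.mpr (Ne.symm h2), beq_eq_false_iff_ne.mpr h3, beq_eq_false_iff_ne.mpr (Ne.symm h3), beq_eq_false_iff_ne.mpr (Ne.symm h4), beq_eq_false_iff_ne.mpr (Ne.symm h5), beq_eq_false_iff_ne.mpr (Ne.symm h6), beq_eq_false_iff_ne.mpr (Ne.symm h7), beq_eq_false_iff_ne.mpr (Ne.symm h8), beq_eq_false_iff_ne.mpr (Ne.symm h9), beq_eq_false_iff_ne.mpr (Ne.symm h10)]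
  decide

theorem pv_neg (x : String) :
    (["negative","bad","sad","poor"].contains x) = (pvIndexB.get? x == some "negative") := by
  rw [pv_index_eq]
  simp only [PySem.Dict.get?_mk_cons, List.contains_cons, List.contains_nil, pv_get?_nil]
  by_cases h0 : x = "positive"
  · subst h0; decide
  by_cases h1 : x = "good"
  · subst h1; decide
  by_cases h2 : x = "happy"
  · subst h2; decide
  by_cases h3 : x = "excellent"
  · subst h3; decide
  by_cases h4 : x = "negative"
  · subst h4; decide
  by_cases h5 : x = "bad"
  · subst h5; decide
  by_cases h6 : x = "sad"
  · subst h6; decide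
  by_cases h7 : x = "poor"
  · subst h7; decide
  by_cases h8 : x = "neutral"
  · subst h8; decide
  by_cases h9 : x = "okay"
  · subst h9; decide
  by_cases h10 : x = "moderate"
  · subst h10; decide
  simp only [beq_eq_false_iff_ne.mpr (Ne.symm h0), beq_eq_false_iff_ne.mpr (Ne.symm h1), beq_eq_false_iff_ne.mpr (Ne.symm h2), beq_eq_false_iff_ne.mpr (Ne.symm h3), beq_eq_false_iff_ne.mpr h4, beq_eq_false_iff_ne.mpr (Ne.symm h4), beq_eq_false_iff_ne.mpr h5, beq_eq_false_iff_ne.mpr (Ne.symm h5), beq_eq_false_iff_ne.mpr h6, beq_eq_false_iff_ne.mpr (Ne.symm h6), beq_eq_false_iff_ne.mpr h7, beq_eq_false_iff_ne.mpr (Ne.symm h7), beq_eq_false_iff_ne.mpr (Ne.symm h8), beq_eq_false_iff_ne.mpr (Ne.symm h9), beq_eq_false_iff_ne.mpr (Ne.symm h10)]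
  decide

theorem pv_neu (x : String) :
    (["neutral","okay","moderate"].contains x) = (pvIndexB.get? x == some "neutral") := by
  rw [pv_index_eq]
  simp only [PySem.Dict.get?_mk_cons, List.contains_cons, List.contains_nil, pv_get?_nil]
  by_cases h0 : x = "positive"
  · subst h0; decide
  by_cases h1 : x = "good"
  · subst h1; decide
  by_cases h2 : x = "happy"
  · subst h2; decide
  by_cases h3 : x = "excellent"
  · subst h3; decide
  by_cases h4 : x = "negative"
  · subst h4; decide
  by_cases h5 : x = "bad"
  · subst h5; decide
  by_cases h6 : x = "sad"
  · subst h6; decide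
  by_cases h7 : x = "poor"
  · subst h7; decide
  by_cases h8 : x = "neutral"
  · subst h8; decide
  by_cases h9 : x = "okay"
  · subst h9; decide
  by_cases h10 : x = "moderate"
  · subst h10; decide
  simp only [beq_eq_false_iff_ne.mpr (Ne.symm h0), beq_eq_false_iff_ne.mpr (Ne.symm h1), beq_eq_false_iff_ne.mpr (Ne.symm h2), beq_eq_false_iff_ne.mpr (Ne.symm h3), beq_eq_false_iff_ne.mpr (Ne.symm h4), beq_eq_false_iff_ne.mpr (Ne.symm h5), beq_eq_false_iff_ne.mpr (Ne.symm h6), beq_eq_false_iff_ne.mpr (Ne.symm h7), beq_eq_false_iff_ne.mpr h8, beq_eq_false_iff_ne.mpr (Ne.symm h8), beq_eq_false_iff_ne.mpr h9, beq_eq_false_iff_ne.mpr (Ne.symm h9), beq_eq_false_iff_ne.mpr h10, beq_eq_false_iff_ne.mpr (Ne.symm h10)]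
  decide

theorem pv_range (x : String) :
    pvIndexB.get? x = none ∨ pvIndexB.get? x = some "positive" ∨
    pvIndexB.get? x = some "negative" ∨ pvIndexB.get? x = some "neutral" := by
  rw [pv_index_eq]
  simp only [PySem.Dict.get?_mk_cons, pv_get?_nil]
  by_cases h0 : x = "positive"
  · subst h0; decide
  by_cases h1 : x = "good"
  · subst h1; decide
  by_cases h2 : x = "happy"
  · subst h2; decide
  by_cases h3 : x = "excellent"
  · subst h3; decide
  by_cases h4 : x = "negative"
  · subst h4; decide
  by_cases h5 : x = "bad"
  · subst h5; decide
  by_cases h6 : x = "sad"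
  · subst h6; decide
  by_cases h7 : x = "poor"
  · subst h7; decide
  by_cases h8 : x = "neutral"
  · subst h8; decide
  by_cases h9 : x = "okay"
  · subst h9; decide
  by_cases h10 : x = "moderate"
  · subst h10; decide
  simp only [beq_eq_false_iff_ne.mpr (Ne.symm h0), beq_eq_false_iff_ne.mpr (Ne.symm h1), beq_eq_false_iff_ne.mpr (Ne.symm h2), beq_eq_false_iff_ne.mpr (Ne.symm h3), beq_eq_false_iff_ne.mpr (Ne.symm h4), beq_eq_false_iff_ne.mpr (Ne.symm h5), beq_eq_false_iff_ne.mpr (Ne.symm h6), beq_eq_false_iff_ne.mpr (Ne.symm h7), beq_eq_false_iff_ne.mpr (Ne.symm h8), beq_eq_false_iff_ne.mpr (Ne.symm h9), beq_eq_false_iff_ne.mpr (Ne.symm h10)]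
  simp

-- core equality on arbitrary (already lowered) strings
theorem pv_core (al el : String) :
    pvLoopA pvSentimentMap.items al el =
      (match pvIndexB.get? al with
       | some ca => if pvIndexB.get? el == some ca then true else al == el
       | none => al == el) := by
  have hm : pvSentimentMap.items = [ ("positive", ["positive", "good", "happy", "excellent"]), ("negative", ["negative", "bad", "sad", "poor"]), ("neutral",  ["neutral", "okay", "moderate"]) ] := by decide
  rw [hm]
  simp only [pvLoopA, pv_pos, pv_neg, pv_neu]
  rcases pv_range al with ha | ha | ha | ha <;>
    rcases pv_range el with hb | hb | hb | hb <;>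
      simp [ha, hb]

-- ===== VERDICT (by name: the statement is the Claim_ definition above) =====
theorem validate_sentiment_spec : Claim_equal_validate_sentiment := by
  intro actual expected _
  unfold Spec_validate_sentiment validate_sentiment validate_sentiment_alt
  exact pv_core _ _
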